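-- pv_equiv track=rewrite | github.com/omd0/QCore | search.py | parseTerms
-- ===== SOURCE A (Python) =====
-- def parseTerms(terms):
--
--     found = []
--
--     buf = ""
--     inquote = 0
--
--     terms = terms.strip()
--
--     for c in terms:
--         if c == "\"":
--             if inquote == 0:
--                 inquote = 1
--             else:
--                 inquote = 0
--                 found.append(buf)
--                 buf = ""
--             continue
--         if c.isspace():
--             if inquote == 0:
--                 if len(buf) > 0:
--                     found.append(buf)
--                     buf = ""
--                 continue
--         buf += c
--
--     if len(buf) > 0:
--         found.append(buf)
--
--     if inquote:
--         raise NameError('Too many quotes')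
--
--     return found
-- ===== SOURCE B (Python) =====
-- def parseTerms(terms):
--     parts = terms.strip().split('"')
--     if len(parts) % 2 == 0:
--         raise NameError('Too many quotes')
--     found = []
--     carry = ""
--     for i, part in enumerate(parts):
--         if i % 2 == 0:
--             words = part.split()
--             carry = ""
--             if words:
--                 if not part[-1].isspace() and i + 1 < len(parts):
--                     carry = words.pop()
--                 found.extend(words)
--         else:
--             found.append(carry + part)
--             carry = ""
--     return found
-- ===== Notes on version B (the rewrite author's own statement) =====
-- stated objective: faster
-- what changed: B replaces A's character-by-character quote/whitespace state machine by splitting the stripped input on '"' into alternating outside/inside regions, whitespace-splitting the outside regions with str.split() and joining a carried partial word onto each quoted region.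
-- outside the precondition, e.g. on parseTerms('"'): A raises NameError, B raises NameError
import Mathlib
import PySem

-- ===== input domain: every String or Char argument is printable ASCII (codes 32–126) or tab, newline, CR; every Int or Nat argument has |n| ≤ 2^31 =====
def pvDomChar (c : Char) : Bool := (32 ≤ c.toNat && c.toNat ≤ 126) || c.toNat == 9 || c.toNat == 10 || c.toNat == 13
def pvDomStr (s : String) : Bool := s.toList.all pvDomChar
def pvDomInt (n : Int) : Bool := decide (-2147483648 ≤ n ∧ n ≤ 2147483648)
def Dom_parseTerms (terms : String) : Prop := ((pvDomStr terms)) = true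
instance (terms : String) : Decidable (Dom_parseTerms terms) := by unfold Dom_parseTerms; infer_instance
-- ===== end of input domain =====

-- B replaces A's char-by-char quote/space state machine by splitting on '"' into alternating
-- outside/inside regions processed with str.split() and a carry word (measured faster in a timing run).

-- ===== PORT A =====
-- one loop iteration of A: state = (found, buf, inquote)
def parseTermsStep (st : List String × List Char × Bool) (c : Char) :
    List String × List Char × Bool :=
  match st with
  | (found, buf, inquote) =>
    if c = '"' then
      if inquote = false then (found, buf, true)
      else (found ++ [String.ofList buf], [], false)
    else if PySem.Chars.isspace c = true ∧ inquote = false then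
      if 0 < buf.length then (found ++ [String.ofList buf], [], false) else (found, buf, inquote)
    else (found, buf ++ [c], inquote)

def parseTerms (terms : String) : List String :=
  let s := PySem.Chars.strip terms.toList
  let st := s.foldl parseTermsStep ([], [], false)
  if 0 < st.2.1.length then st.1 ++ [String.ofList st.2.1] else st.1

-- ===== PORT B =====
-- the for-loop of Source B over enumerate(parts): i = index, carry as in Source B
def parseTermsAltGo (plen : Nat) : Nat → List String → List Char → List (List Char) → List String
  | _, found, _, [] => found
  | i, found, carry, part :: rest =>
    if i % 2 = 0 then
      let words := PySem.Chars.split₀ part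
      if words = [] then parseTermsAltGo plen (i+1) found [] rest
      else if ¬ PySem.Chars.isspace (part.getLastD ' ') = true ∧ i + 1 < plen then
        parseTermsAltGo plen (i+1) (found ++ words.dropLast.map (fun w => String.ofList w)) (words.getLastD []) rest
      else parseTermsAltGo plen (i+1) (found ++ words.map (fun w => String.ofList w)) [] rest
    else parseTermsAltGo plen (i+1) (found ++ [String.ofList (carry ++ part)]) [] rest

def parseTerms_alt (terms : String) : List String :=
  let parts := (PySem.Chars.strip terms.toList).splitOn '"'
  parseTermsAltGo parts.length 0 [] [] parts

-- ===== PRECONDITION & SPEC =====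
-- Pre_ excludes exactly the inputs with an odd number of '"', on which A raises NameError (B raises too).
def Pre_parseTerms (terms : String) : Prop := terms.toList.count '"' % 2 = 0
instance (terms : String) : Decidable (Pre_parseTerms terms) := by unfold Pre_parseTerms; infer_instance
def pvWitness_parseTerms : String := "ab \"c  d\" e"
def Spec_parseTerms (terms : String) (out : List String) : Prop := out = parseTerms_alt terms
instance (terms : String) (out : List String) : Decidable (Spec_parseTerms terms out) := by unfold Spec_parseTerms; infer_instance

-- ===== CLAIM (what is proved, stated in full; the proofs are below) =====
def Claim_equal_parseTerms : Prop := ∀ (terms : String), Dom_parseTerms terms → Pre_parseTerms terms → Spec_parseTerms terms (parseTerms terms)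

-- ===== LEMMAS AND PROOFS =====

-- proof-side spec: scan a quote-free outside region; returns (complete words, partial word)
def outScan : List Char → List Char → List (List Char) × List Char
  | [], buf => ([], buf)
  | c :: rest, buf =>
    if PySem.Chars.isspace c then
      if buf = [] then outScan rest []
      else
        let r := outScan rest []
        (buf :: r.1, r.2)
    else outScan rest (buf ++ [c])

-- proof-side spec over the alternating parts: (emitted tokens, final carry)
def pairsOut : List (List Char) → List String × List Char
  | [] => ([], [])
  | [p] => ((outScan p []).1.map String.ofList, (outScan p []).2)
  | p :: qp :: rest =>
      ((outScan p []).1.map String.ofList ++ [String.ofList ((outScan p []).2 ++ qp)] ++ (pairsOut rest).1,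
       (pairsOut rest).2)

def pairsSpec (ps : List (List Char)) : List String :=
  (pairsOut ps).1 ++ (if (pairsOut ps).2 = [] then [] else [String.ofList (pairsOut ps).2])

theorem step_char_in (found : List String) (buf : List Char) (c : Char) (h : c ≠ '"') :
    parseTermsStep (found, buf, true) c = (found, buf ++ [c], true) := by
  simp [parseTermsStep, h]

theorem step_quote_out (found : List String) (buf : List Char) :
    parseTermsStep (found, buf, false) '"' = (found, buf, true) := by
  simp [parseTermsStep]

theorem step_quote_in (found : List String) (buf : List Char) :
    parseTermsStep (found, buf, true) '"' = (found ++ [String.ofList buf], [], false) := by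
  simp [parseTermsStep]

theorem foldl_in (cs : List Char) (h : ('"' : Char) ∉ cs) :
    ∀ found buf, List.foldl parseTermsStep (found, buf, true) cs = (found, buf ++ cs, true) := by
  induction cs with
  | nil => simp
  | cons c rest ih =>
    intro found buf
    simp only [List.mem_cons, not_or] at h
    rw [List.foldl_cons, step_char_in _ _ _ (Ne.symm h.1), ih h.2]
    simp

theorem step_space_out_nil (found : List String) (c : Char) (hsp : PySem.Chars.isspace c = true)
    (h : c ≠ '"') : parseTermsStep (found, [], false) c = (found, [], false) := by
  simp [parseTermsStep, h, hsp]

theorem step_space_out_flush (found : List String) (buf : List Char) (c : Char)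
    (hsp : PySem.Chars.isspace c = true) (h : c ≠ '"') (hb : buf ≠ []) :
    parseTermsStep (found, buf, false) c = (found ++ [String.ofList buf], [], false) := by
  have : 0 < buf.length := by cases buf <;> simp_all
  simp [parseTermsStep, h, hsp, this]

theorem step_char_out (found : List String) (buf : List Char) (c : Char)
    (hsp : ¬ PySem.Chars.isspace c = true) (h : c ≠ '"') :
    parseTermsStep (found, buf, false) c = (found, buf ++ [c], false) := by
  simp [parseTermsStep, h, hsp]

theorem foldl_out (cs : List Char) (h : ('"' : Char) ∉ cs) :
    ∀ found buf, List.foldl parseTermsStep (found, buf, false) cs =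
      (found ++ (outScan cs buf).1.map String.ofList, (outScan cs buf).2, false) := by
  induction cs with
  | nil => intro found buf; simp [outScan]
  | cons c rest ih =>
    intro found buf
    simp only [List.mem_cons, not_or] at h
    by_cases hsp : PySem.Chars.isspace c = true
    · by_cases hb : buf = []
      · subst hb
        rw [List.foldl_cons, step_space_out_nil _ _ hsp (Ne.symm h.1), ih h.2]
        simp [outScan, hsp]
      · rw [List.foldl_cons, step_space_out_flush _ _ _ hsp (Ne.symm h.1) hb, ih h.2]
        simp [outScan, hsp, hb]
    · rw [List.foldl_cons, step_char_out _ _ _ hsp (Ne.symm h.1), ih h.2]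
      simp [outScan, hsp]

theorem amain : ∀ (parts : List (List Char)), (∀ x ∈ parts, ('"' : Char) ∉ x) →
    parts.length % 2 = 1 → ∀ found,
    List.foldl parseTermsStep (found, [], false) ([('"' : Char)].intercalate parts) =
      (found ++ (pairsOut parts).1, (pairsOut parts).2, false)
  | [], _, hl => by simp at hl
  | [p], h, _ => by
    intro found
    rw [show List.intercalate [('"' : Char)] [p] = p by simp [List.intercalate]]
    rw [foldl_out p (h p (by simp)) found []]
    simp [pairsOut]
  | p :: qp :: rest, h, hl => by
    intro found
    have hrest : rest ≠ [] := by
      intro hr; subst hr; simp at hl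
    obtain ⟨r0, rtail, hr⟩ := List.exists_cons_of_ne_nil hrest
    have hic : List.intercalate [('"' : Char)] (p :: qp :: rest) =
        p ++ ['"'] ++ (qp ++ ['"'] ++ List.intercalate [('"' : Char)] rest) := by
      subst hr
      simp [List.intercalate, List.intersperse]
    rw [hic]
    rw [List.foldl_append, List.foldl_append, List.foldl_append, List.foldl_append]
    simp only [List.foldl_cons, List.foldl_nil]
    rw [foldl_out p (h p (by simp)) found [], step_quote_out, foldl_in qp (h qp (by simp)),
      step_quote_in, amain rest (fun x hx => h x (by simp [hx])) (by simp at hl; omega)]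
    simp [pairsOut, hr]

theorem split₀_go_eq (cs : List Char) : ∀ cur acc,
    PySem.Chars.split₀.go cs cur acc =
      acc.reverse ++ (outScan cs cur.reverse).1 ++
        (if (outScan cs cur.reverse).2 = [] then [] else [(outScan cs cur.reverse).2]) := by
  induction cs with
  | nil =>
    intro cur acc
    by_cases hc : cur = []
    · subst hc; simp [PySem.Chars.split₀.go, outScan]
    · simp [PySem.Chars.split₀.go, outScan, hc, List.isEmpty_iff]
  | cons c rest ih =>
    intro cur acc
    by_cases hsp : PySem.Chars.isspace c = true
    · by_cases hc : cur = []
      · subst hc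
        simp only [PySem.Chars.split₀.go, hsp, List.isEmpty_nil, if_true]
        rw [ih [] acc]
        simp [outScan, hsp]
      · simp only [PySem.Chars.split₀.go, hsp, if_true, List.isEmpty_iff, if_neg hc]
        rw [ih [] (cur.reverse :: acc)]
        simp [outScan, hsp, hc]
    · simp only [PySem.Chars.split₀.go, hsp, Bool.false_eq_true, if_false]
      rw [ih (c :: cur) acc]
      simp [outScan, hsp]

theorem split₀_eq (cs : List Char) :
    PySem.Chars.split₀ cs =
      (outScan cs []).1 ++ (if (outScan cs []).2 = [] then [] else [(outScan cs []).2]) := by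
  have := split₀_go_eq cs [] []
  simpa [PySem.Chars.split₀] using this

theorem carry_iff (cs : List Char) (hne : cs ≠ []) : ∀ buf (d : Char),
    ((outScan cs buf).2 = [] ↔ PySem.Chars.isspace (cs.getLastD d) = true) := by
  induction cs with
  | nil => exact absurd rfl hne
  | cons c rest ih =>
    intro buf d
    by_cases hr : rest = []
    · subst hr
      by_cases hsp : PySem.Chars.isspace c = true
      · by_cases hb : buf = [] <;> simp [outScan, hsp, hb]
      · simp [outScan, hsp]
    · have hlast : (c :: rest).getLastD d = rest.getLastD c := by
        obtain ⟨r, t, rfl⟩ := List.exists_cons_of_ne_nil hr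
        simp [List.getLastD]
      rw [hlast]
      by_cases hsp : PySem.Chars.isspace c = true
      · by_cases hb : buf = []
        · simp only [outScan, hsp, if_true, if_pos hb]
          exact ih hr [] c
        · simp only [outScan, hsp, if_true, if_neg hb]
          exact ih hr [] c
      · simp only [outScan, hsp, Bool.false_eq_true, if_false]
        exact ih hr (buf ++ [c]) c

theorem split₀_components_nil (p : List Char) (hw : PySem.Chars.split₀ p = []) :
    (outScan p []).1 = [] ∧ (outScan p []).2 = [] := by
  have h := split₀_eq p
  rw [hw] at h
  by_cases h2 : (outScan p []).2 = []
  · rw [if_pos h2] at h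
    exact ⟨by simpa using h.symm, h2⟩
  · rw [if_neg h2] at h
    exact absurd h.symm (by simp)

theorem split₀_ne_nil_of_arg_ne (p : List Char) (hw : PySem.Chars.split₀ p ≠ []) : p ≠ [] := by
  intro h; subst h
  exact hw rfl

theorem bmain : ∀ (ps : List (List Char)) (i : Nat) (plen : Nat) (found : List String),
    i % 2 = 0 → ps.length % 2 = 1 → plen = i + ps.length →
    parseTermsAltGo plen i found [] ps = found ++ pairsSpec ps
  | [], _, _, _, _, hl, _ => by simp at hl
  | [p], i, plen, found, hi, _, hp => by
    simp only [parseTermsAltGo, if_pos hi]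
    by_cases hw : PySem.Chars.split₀ p = []
    · rw [if_pos hw]
      obtain ⟨h1, h2⟩ := split₀_components_nil p hw
      simp [pairsSpec, pairsOut, h1, h2]
    · rw [if_neg hw, if_neg (by rintro ⟨-, hb⟩; rw [hp] at hb; simp at hb)]
      rw [split₀_eq p]
      by_cases h2 : (outScan p []).2 = []
      · simp [pairsSpec, pairsOut, h2]
      · simp [pairsSpec, pairsOut, h2]
  | p :: qp :: rest, i, plen, found, hi, hl, hp => by
    have hrest : rest ≠ [] := by intro h; subst h; simp at hl
    have hro : rest.length % 2 = 1 := by simp at hl; omega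
    have hi1 : ¬ ((i + 1) % 2 = 0) := by omega
    have hlen : (p :: qp :: rest).length = rest.length + 2 := by simp
    simp only [parseTermsAltGo, if_pos hi]
    by_cases hw : PySem.Chars.split₀ p = []
    · rw [if_pos hw]
      obtain ⟨h1, h2⟩ := split₀_components_nil p hw
      simp only [if_neg hi1]
      rw [bmain rest (i+2) plen _ (by omega) hro (by rw [hp, hlen]; omega)]
      simp [pairsSpec, pairsOut, h1, h2]
    · rw [if_neg hw]
      have hplt : i + 1 < plen := by rw [hp, hlen]; omega
      by_cases hlast : PySem.Chars.isspace (p.getLastD ' ') = true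
      · rw [if_neg (fun h => h.1 hlast)]
        have h2 : (outScan p []).2 = [] :=
          (carry_iff p (split₀_ne_nil_of_arg_ne p hw) [] ' ').mpr hlast
        rw [split₀_eq p, if_pos h2]
        simp only [if_neg hi1]
        rw [bmain rest (i+2) plen _ (by omega) hro (by rw [hp, hlen]; omega)]
        simp [pairsSpec, pairsOut, h2]
      · rw [if_pos ⟨hlast, hplt⟩]
        have h2 : (outScan p []).2 ≠ [] := by
          intro h
          exact hlast ((carry_iff p (split₀_ne_nil_of_arg_ne p hw) [] ' ').mp h)
        rw [split₀_eq p, if_neg h2]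
        have hdl : ((outScan p []).1 ++ [(outScan p []).2]).dropLast = (outScan p []).1 :=
          List.dropLast_concat
        have hgl : ((outScan p []).1 ++ [(outScan p []).2]).getLastD [] = (outScan p []).2 :=
          List.getLastD_concat
        rw [hdl, hgl]
        simp only [if_neg hi1]
        rw [bmain rest (i+2) plen _ (by omega) hro (by rw [hp, hlen]; omega)]
        simp [pairsSpec, pairsOut]

theorem count_dropWhile_isspace (l : List Char) :
    (l.dropWhile PySem.Chars.isspace).count '"' = l.count '"' := by
  conv_rhs => rw [← List.takeWhile_append_dropWhile (p := PySem.Chars.isspace) (l := l)]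
  rw [List.count_append]
  have : (l.takeWhile PySem.Chars.isspace).count '"' = 0 := by
    rw [List.count_eq_zero]
    intro hm
    have := List.mem_takeWhile_imp hm
    simp [PySem.Chars.isspace] at this
  omega

theorem count_strip (l : List Char) :
    (PySem.Chars.strip l).count '"' = l.count '"' := by
  simp only [PySem.Chars.strip, PySem.Chars.lstrip, PySem.Chars.rstrip]
  rw [List.count_reverse, count_dropWhile_isspace, List.count_reverse, count_dropWhile_isspace]

theorem length_splitOnP (p : Char → Bool) (l : List Char) :
    (List.splitOnP p l).length = l.countP p + 1 := by
  induction l with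
  | nil => simp [List.splitOnP_nil]
  | cons c rest ih =>
    rw [List.splitOnP_cons]
    by_cases hc : p c = true
    · simp [hc, ih]
    · simp [hc, ih]

theorem length_splitOn (l : List Char) :
    (l.splitOn '"').length = l.count '"' + 1 := by
  rw [List.splitOn, length_splitOnP, List.count]

theorem notin_splitOnP (p : Char → Bool) (l : List Char) :
    ∀ x ∈ List.splitOnP p l, ∀ c ∈ x, p c = false := by
  induction l with
  | nil =>
    intro x hx
    simp [List.splitOnP_nil] at hx
    simp [hx]
  | cons a rest ih =>
    intro x hx c hc
    rw [List.splitOnP_cons] at hx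
    by_cases ha : p a = true
    · rw [if_pos ha] at hx
      rcases List.mem_cons.mp hx with h | h
      · subst h; simp at hc
      · exact ih x h c hc
    · rw [if_neg ha] at hx
      obtain ⟨h0, t, ht⟩ := List.exists_cons_of_ne_nil (List.splitOnP_ne_nil p rest)
      rw [ht] at hx
      simp only [List.modifyHead_cons] at hx
      rcases List.mem_cons.mp hx with h | h
      · subst h
        rcases List.mem_cons.mp hc with h | h
        · subst h; simpa using ha
        · exact ih h0 (by rw [ht]; exact List.mem_cons_self) c h
      · exact ih x (by rw [ht]; exact List.mem_cons_of_mem _ h) c hc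

theorem quote_notin_splitOn (l : List Char) :
    ∀ x ∈ l.splitOn '"', ('"' : Char) ∉ x := by
  intro x hx hq
  have := notin_splitOnP (· == '"') l x (by simpa [List.splitOn] using hx) '"' hq
  simp at this

-- ===== VERDICT (by name: the statement is the Claim_ definition above) =====
theorem parseTerms_spec : Claim_equal_parseTerms := by
  intro terms _ hpre
  unfold Spec_parseTerms parseTerms parseTerms_alt
  simp only []
  have hqf := quote_notin_splitOn (PySem.Chars.strip terms.toList)
  have hodd : ((PySem.Chars.strip terms.toList).splitOn '"').length % 2 = 1 := by
    rw [length_splitOn, count_strip]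
    unfold Pre_parseTerms at hpre
    omega
  have hA := amain _ hqf hodd []
  rw [List.intercalate_splitOn _ '"'] at hA
  have hB := bmain ((PySem.Chars.strip terms.toList).splitOn '"') 0
    ((PySem.Chars.strip terms.toList).splitOn '"').length [] (by simp) hodd (by simp)
  rw [hA, hB]
  by_cases h2 : (pairsOut ((PySem.Chars.strip terms.toList).splitOn '"')).2 = []
  · simp [pairsSpec, h2]
  · have : 0 < (pairsOut ((PySem.Chars.strip terms.toList).splitOn '"')).2.length := by
      cases h : (pairsOut ((PySem.Chars.strip terms.toList).splitOn '"')).2 <;> simp_all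
    simp [pairsSpec, h2, this]
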